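-- pv_equiv track=rewrite | github.com/yagocouto/mod_cisco0.02 | scripts/modelo_cisco.py | extrair_entradas_cdp
-- ===== SOURCE A (Python) =====
-- def extrair_valor_unico(chave, linha):
--     if chave in linha:
--         return linha.split(chave)[1].strip()
--     return None
--
-- def extrair_entradas_cdp(linhas):
--     entradas = []
--     for i, linha in enumerate(linhas):
--         if "Device ID:" in linha:
--             neighbor_device = extrair_valor_unico("Device ID:", linha)
--             neighbor_port = ""
--             local_port = ""
--             ip = ""
--
--             for j in range(i + 1, len(linhas)):
--                 if "Interface:" in linhas[j]:
--                     partes = linhas[j].split(",")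
--                     if len(partes) >= 2:
--                         local_port = partes[0].split("Interface:")[1].strip()
--                         neighbor_port = (
--                             partes[1].split("Port ID (outgoing port):")[1].strip()
--                         )
--                 elif "IP address:" in linhas[j]:
--                     ip = linhas[j].split("IP address:")[1].strip()
--                 elif linhas[j].strip() == "":
--                     break
--
--             entradas.append(
--                 {
--                     "Local Port": local_port.replace("GigabitEthernet", "Gi").replace(
--                         "FastEthernet", "Fa"
--                     ),
--                     "Neighbor Device": neighbor_device,
--                     "Neighbor IP": ip,
--                     "Neighbor Port": neighbor_port,
--                 }
--             )
--     return entradas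
-- ===== SOURCE B (Python) =====
-- def extrair_entradas_cdp(linhas):
--     entradas = []
--     pair = None  # (local_port, neighbor_port) from the last Interface line of the current block
--     ip = None
--     for linha in reversed(linhas):
--         if "Device ID:" in linha:
--             lp, np = pair if pair is not None else ("", "")
--             entradas.append(
--                 {
--                     "Local Port": lp.replace("GigabitEthernet", "Gi").replace(
--                         "FastEthernet", "Fa"
--                     ),
--                     "Neighbor Device": linha.split("Device ID:")[1].strip(),
--                     "Neighbor IP": ip if ip is not None else "",
--                     "Neighbor Port": np,
--                 }
--             )
--         if "Interface:" in linha: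
--             partes = linha.split(",")
--             if len(partes) >= 2 and pair is None:
--                 if "Interface:" in partes[0] and "Port ID (outgoing port):" in partes[1]:
--                     pair = (
--                         partes[0].split("Interface:")[1].strip(),
--                         partes[1].split("Port ID (outgoing port):")[1].strip(),
--                     )
--         elif "IP address:" in linha:
--             if ip is None:
--                 ip = linha.split("IP address:")[1].strip()
--         elif linha.strip() == "":
--             pair = None
--             ip = None
--     entradas.reverse()
--     return entradas
-- ===== Notes on version B (the rewrite author's own statement) =====
-- stated objective: alternative
-- what changed: A rescans all lines after every 'Device ID:' line; B does one backward pass that carries the current block's last Interface pair and IP (reset at blank lines) and emits each entry when its Device ID line is reached.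
import Mathlib
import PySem

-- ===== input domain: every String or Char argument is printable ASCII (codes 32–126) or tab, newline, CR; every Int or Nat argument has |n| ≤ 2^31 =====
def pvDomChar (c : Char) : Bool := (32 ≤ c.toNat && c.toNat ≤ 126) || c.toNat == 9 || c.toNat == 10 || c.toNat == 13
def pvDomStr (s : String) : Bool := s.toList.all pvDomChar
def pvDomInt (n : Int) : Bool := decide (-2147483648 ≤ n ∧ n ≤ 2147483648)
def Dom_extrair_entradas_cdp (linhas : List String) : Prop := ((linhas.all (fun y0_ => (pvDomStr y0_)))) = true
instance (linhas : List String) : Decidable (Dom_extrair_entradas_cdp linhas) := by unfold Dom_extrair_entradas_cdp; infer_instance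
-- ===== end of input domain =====

-- B replaces A's per-device rescan of the following lines by one backward pass that carries
-- the current block's last Interface/IP data; return values proved equal on Pre_.

-- s.split(sep) for a non-empty literal sep (split? is none only for sep = "")
def pvSplit (s sep : String) : List String := (PySem.Str.split? s sep).getD []

-- ===== PORT A =====
def extrair_valor_unico (chave linha : String) : Option String :=
  if PySem.Str.isIn chave linha then
    -- chave in linha ⇒ the split has ≥ 2 parts, so the getD default is never used
    some (PySem.Str.strip ((pvSplit linha chave).getD 1 ""))
  else none

-- the dict literal appended by both Pythons (insertion order preserved)
def pvEntry (nd lp np ip : String) : List (String × String) :=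
  [("Local Port", PySem.Str.replace (PySem.Str.replace lp "GigabitEthernet" "Gi") "FastEthernet" "Fa"),
   ("Neighbor Device", nd),
   ("Neighbor IP", ip),
   ("Neighbor Port", np)]

-- A's inner loop 'for j in range(i+1, len(linhas))' over the suffix after the Device ID line,
-- threading (local_port, neighbor_port, ip); where Python would raise IndexError (a marker
-- missing from a ≥2-part Interface line) the getD returns "" — those inputs are outside Pre_.
def pvScanBlock : List String → String × String × String → String × String × String
  | [], st => st
  | linha :: rest, (lp, np, ip) =>
    if PySem.Str.isIn "Interface:" linha then
      let partes := pvSplit linha ","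
      if 2 ≤ partes.length then
        pvScanBlock rest
          (PySem.Str.strip ((pvSplit (partes.getD 0 "") "Interface:").getD 1 ""),
           PySem.Str.strip ((pvSplit (partes.getD 1 "") "Port ID (outgoing port):").getD 1 ""),
           ip)
      else pvScanBlock rest (lp, np, ip)
    else if PySem.Str.isIn "IP address:" linha then
      pvScanBlock rest (lp, np, PySem.Str.strip ((pvSplit linha "IP address:").getD 1 ""))
    else if PySem.Str.strip linha = "" then (lp, np, ip)
    else pvScanBlock rest (lp, np, ip)

def extrair_entradas_cdp : List String → List (List (String × String))
  | [] => []
  | linha :: rest =>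
    if PySem.Str.isIn "Device ID:" linha then
      let nd := (extrair_valor_unico "Device ID:" linha).getD ""  -- guarded: always some
      let st := pvScanBlock rest ("", "", "")
      pvEntry nd st.1 st.2.1 st.2.2 :: extrair_entradas_cdp rest
    else extrair_entradas_cdp rest

-- ===== PORT B =====
-- one step of Source B's 'for linha in reversed(linhas)' loop; state = (entradas, pair, ip)
def pvAltStep (linha : String)
    (st : List (List (String × String)) × Option (String × String) × Option String) :
    List (List (String × String)) × Option (String × String) × Option String :=
  let es :=
    if PySem.Str.isIn "Device ID:" linha then
      let p := st.2.1.getD ("", "")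
      pvEntry (PySem.Str.strip ((pvSplit linha "Device ID:").getD 1 ""))
        p.1 p.2 (st.2.2.getD "") :: st.1
    else st.1
  if PySem.Str.isIn "Interface:" linha then
    let partes := pvSplit linha ","
    if 2 ≤ partes.length ∧ st.2.1 = none then
      if PySem.Str.isIn "Interface:" (partes.getD 0 "") ∧
         PySem.Str.isIn "Port ID (outgoing port):" (partes.getD 1 "") then
        (es, some (PySem.Str.strip ((pvSplit (partes.getD 0 "") "Interface:").getD 1 ""),
                   PySem.Str.strip ((pvSplit (partes.getD 1 "") "Port ID (outgoing port):").getD 1 "")),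
         st.2.2)
      else (es, st.2.1, st.2.2)
    else (es, st.2.1, st.2.2)
  else if PySem.Str.isIn "IP address:" linha then
    (es, st.2.1,
     if st.2.2 = none then some (PySem.Str.strip ((pvSplit linha "IP address:").getD 1 "")) else st.2.2)
  else if PySem.Str.strip linha = "" then (es, none, none)
  else (es, st.2.1, st.2.2)

-- reversed iteration with a final list reversal = foldr building the result front-to-back
def extrair_entradas_cdp_alt (linhas : List String) : List (List (String × String)) :=
  (linhas.foldr pvAltStep ([], none, none)).1

-- ===== PRECONDITION & SPEC =====
-- a line on which A's Interface branch raises IndexError (a marker missing from a ≥2-part split)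
def pvBadLine (linha : String) : Bool :=
  PySem.Str.isIn "Interface:" linha &&
  decide (2 ≤ (pvSplit linha ",").length) &&
  !(PySem.Str.isIn "Interface:" ((pvSplit linha ",").getD 0 "") &&
    PySem.Str.isIn "Port ID (outgoing port):" ((pvSplit linha ",").getD 1 ""))

-- no bad line occurs before the first blank line (the part of a block A's inner loop reaches)
def pvBlockOk : List String → Bool
  | [] => true
  | linha :: rest =>
    if PySem.Str.isIn "Interface:" linha then !pvBadLine linha && pvBlockOk rest
    else if PySem.Str.isIn "IP address:" linha then pvBlockOk rest
    else if PySem.Str.strip linha = "" then true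
    else pvBlockOk rest

def pvPreB : List String → Bool
  | [] => true
  | linha :: rest =>
    (if PySem.Str.isIn "Device ID:" linha then pvBlockOk rest else true) && pvPreB rest

-- Pre_ excludes exactly the inputs on which Python A raises IndexError: some line after a
-- 'Device ID:' line and before the next blank line contains 'Interface:' and splits on ','
-- into ≥ 2 parts but lacks 'Interface:' in part 0 or 'Port ID (outgoing port):' in part 1.
def Pre_extrair_entradas_cdp (linhas : List String) : Prop := pvPreB linhas = true
instance (linhas : List String) : Decidable (Pre_extrair_entradas_cdp linhas) := by
  unfold Pre_extrair_entradas_cdp; infer_instance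

def pvWitness_extrair_entradas_cdp : List String :=
  ["Device ID: R1", "IP address: 10.0.0.1",
   "Interface: GigabitEthernet0/1,  Port ID (outgoing port): FastEthernet0/2", "", "junk"]

def Spec_extrair_entradas_cdp (linhas : List String) (out : List (List (String × String))) : Prop := out = extrair_entradas_cdp_alt linhas
instance (linhas : List String) (out : List (List (String × String))) : Decidable (Spec_extrair_entradas_cdp linhas out) := by unfold Spec_extrair_entradas_cdp; infer_instance

-- ===== CLAIM (what is proved, stated in full; the proofs are below) =====
def Claim_equal_extrair_entradas_cdp : Prop := ∀ (linhas : List String), Dom_extrair_entradas_cdp linhas → Pre_extrair_entradas_cdp linhas → Spec_extrair_entradas_cdp linhas (extrair_entradas_cdp linhas)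


-- ===== LEMMAS AND PROOFS =====

-- On a block with no reachable bad line, A's forward overwrite scan from state (a,b,c) equals
-- B's backward first-wins state, with (a,b) and c as defaults for the not-yet-seen fields.
theorem pvScanBlock_eq_alt (l : List String) (a b c : String) (h : pvBlockOk l = true) :
    pvScanBlock l (a, b, c) =
      (((l.foldr pvAltStep ([], none, none)).2.1.getD (a, b)).1,
       ((l.foldr pvAltStep ([], none, none)).2.1.getD (a, b)).2,
       (l.foldr pvAltStep ([], none, none)).2.2.getD c) := by
  induction l generalizing a b c with
  | nil => simp [pvScanBlock]
  | cons linha rest ih =>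
    rw [List.foldr_cons]
    by_cases h1 : PySem.Str.isIn "Interface:" linha = true
    · have hb : pvBadLine linha = false ∧ pvBlockOk rest = true := by
        simp only [pvBlockOk, h1, if_true, Bool.and_eq_true, Bool.not_eq_true'] at h
        exact h
      by_cases h2 : 2 ≤ (pvSplit linha ",").length
      · have h3 : PySem.Str.isIn "Interface:" ((pvSplit linha ",").getD 0 "") = true ∧
            PySem.Str.isIn "Port ID (outgoing port):" ((pvSplit linha ",").getD 1 "") = true := by
          have := hb.1
          simp only [pvBadLine, h1, Bool.true_and, Bool.and_eq_false_iff, decide_eq_false_iff_not] at this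
          rcases this with h' | h'
          · exact absurd h2 h'
          · simpa [Bool.not_eq_false', Bool.and_eq_true] using h'
        simp only [pvScanBlock, h1, if_true, if_pos h2]
        rw [ih _ _ _ hb.2]
        by_cases h4 : (rest.foldr pvAltStep ([], none, none)).2.1 = none
        · simp only [pvAltStep, h1, if_true, h4, and_true, if_pos h2, if_pos h3, Option.getD_some, Option.getD_none]
        · rcases Option.ne_none_iff_exists'.mp h4 with ⟨q, hq⟩
          simp only [pvAltStep, h1, if_true, hq, if_neg (by simp : ¬(2 ≤ (pvSplit linha ",").length ∧ some q = none)), Option.getD_some]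
      · simp only [pvScanBlock, h1, if_true, if_neg h2]
        rw [ih _ _ _ hb.2]
        simp only [pvAltStep, h1, if_true, if_neg (fun hc : _ ∧ _ => h2 hc.1)]
    · have h1' : PySem.Str.isIn "Interface:" linha = false := by simpa using h1
      by_cases h4 : PySem.Str.isIn "IP address:" linha = true
      · have hb : pvBlockOk rest = true := by
          simpa only [pvBlockOk, h1', if_false, h4, if_true, Bool.false_eq_true] using h
        simp only [pvScanBlock, h1', Bool.false_eq_true, if_false, h4, if_true]
        rw [ih _ _ _ hb]
        by_cases h5 : (rest.foldr pvAltStep ([], none, none)).2.2 = none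
        · simp only [pvAltStep, h1', Bool.false_eq_true, if_false, h4, if_true, h5, Option.getD_none, Option.getD_some]
        · rcases Option.ne_none_iff_exists'.mp h5 with ⟨q, hq⟩
          simp only [pvAltStep, h1', Bool.false_eq_true, if_false, h4, if_true, hq, if_neg (Option.some_ne_none q), Option.getD_some]
      · have h4' : PySem.Str.isIn "IP address:" linha = false := by simpa using h4
        by_cases h6 : PySem.Str.strip linha = ""
        · simp only [pvScanBlock, h1', h4', Bool.false_eq_true, if_false, if_pos h6]
          simp only [pvAltStep, h1', h4', Bool.false_eq_true, if_false, if_pos h6, Option.getD_none]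
        · have hb : pvBlockOk rest = true := by
            simpa only [pvBlockOk, h1', h4', Bool.false_eq_true, if_false, if_neg h6] using h
          simp only [pvScanBlock, h1', h4', Bool.false_eq_true, if_false, if_neg h6]
          rw [ih _ _ _ hb]
          simp only [pvAltStep, h1', h4', Bool.false_eq_true, if_false, if_neg h6]

theorem pvAltStep_fst (linha : String)
    (st : List (List (String × String)) × Option (String × String) × Option String) :
    (pvAltStep linha st).1 =
      if PySem.Str.isIn "Device ID:" linha = true then
        pvEntry (PySem.Str.strip ((pvSplit linha "Device ID:").getD 1 ""))
          (st.2.1.getD ("", "")).1 (st.2.1.getD ("", "")).2 (st.2.2.getD "") :: st.1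
      else st.1 := by
  simp only [pvAltStep]
  split_ifs <;> rfl

theorem pvEntries_eq (linhas : List String) (h : pvPreB linhas = true) :
    (linhas.foldr pvAltStep ([], none, none)).1 = extrair_entradas_cdp linhas := by
  induction linhas with
  | nil => rfl
  | cons linha rest ih =>
    by_cases h1 : PySem.Str.isIn "Device ID:" linha = true
    · have h' : pvBlockOk rest = true ∧ pvPreB rest = true := by
        simpa only [pvPreB, h1, if_true, Bool.and_eq_true] using h
      rw [List.foldr_cons, pvAltStep_fst, ih h'.2, if_pos h1]
      simp only [extrair_entradas_cdp, h1, if_true, extrair_valor_unico, Option.getD_some,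
        pvScanBlock_eq_alt rest "" "" "" h'.1]
    · have h1' : PySem.Str.isIn "Device ID:" linha = false := by simpa using h1
      have h' : pvPreB rest = true := by
        simpa only [pvPreB, h1', Bool.false_eq_true, if_false, Bool.true_and, Bool.and_eq_true] using h
      rw [List.foldr_cons, pvAltStep_fst, ih h', if_neg h1]
      simp only [extrair_entradas_cdp, h1', Bool.false_eq_true, if_false]

-- ===== VERDICT (by name: the statement is the Claim_ definition above) =====
theorem extrair_entradas_cdp_spec : Claim_equal_extrair_entradas_cdp := by
  intro linhas _ hpre
  unfold Spec_extrair_entradas_cdp extrair_entradas_cdp_alt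
  exact (pvEntries_eq linhas hpre).symm
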